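-- pv_equiv track=rewrite | github.com/soenkebruns/hoerspiel-batch-merger | src/scanner.py | group_by_album
-- ===== SOURCE A (Python) =====
-- def group_by_album(files):
--     """
--     Group files by album tag
--     Returns dict: {album_name: [file_info, ...]}
--     """
--     groups = {}
--     for file_info in files:
--         album = file_info.get('album') or 'Unknown Album'
--         artist = file_info.get('artist') or 'Unknown Artist'
--         key = f"{artist} - {album}"
--
--         if key not in groups:
--             groups[key] = []
--         groups[key].append(file_info)
--
--     return groups
-- ===== SOURCE B (Python) =====
-- def group_by_album(files):
--     """
--     Group files by album tag
--     Returns dict: {album_name: [file_info, ...]}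
--     """
--     def key_of(file_info):
--         album = file_info.get('album') or 'Unknown Album'
--         artist = file_info.get('artist') or 'Unknown Artist'
--         return f"{artist} - {album}"
--
--     keys = []
--     for file_info in files:
--         k = key_of(file_info)
--         if k not in keys:
--             keys.append(k)
--     return {k: [f for f in files if key_of(f) == k] for k in keys}
-- ===== Notes on version B (the rewrite author's own statement) =====
-- stated objective: alternative
-- what changed: B replaces A's single-pass dict accumulation (create-empty-then-append per file) with a two-phase plan: first collect the distinct artist-album keys in first-occurrence order, then build the dict in one comprehension whose value for each key is a filter of the whole file list.
import Mathlib
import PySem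

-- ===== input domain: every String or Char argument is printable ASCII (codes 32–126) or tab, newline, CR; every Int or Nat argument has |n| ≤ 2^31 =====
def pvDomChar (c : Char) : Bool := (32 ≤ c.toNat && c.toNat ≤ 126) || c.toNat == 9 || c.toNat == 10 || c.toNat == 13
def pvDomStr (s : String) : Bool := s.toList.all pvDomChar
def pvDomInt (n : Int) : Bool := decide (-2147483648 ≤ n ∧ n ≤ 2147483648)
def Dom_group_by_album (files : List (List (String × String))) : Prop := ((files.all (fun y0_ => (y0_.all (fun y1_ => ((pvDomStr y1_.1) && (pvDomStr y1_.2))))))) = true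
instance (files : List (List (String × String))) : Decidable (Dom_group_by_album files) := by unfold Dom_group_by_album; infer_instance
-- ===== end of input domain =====

-- B replaces A's single-pass dict accumulation with two phases (dedup keys, then one filter per key);
-- objective: alternative decomposition (not faster).

-- ===== PORT A =====
-- A's loop body: compute album/artist with the 'or' fallbacks, the key, ensure the key is present, append.
def pvStepA (groups : PySem.Dict String (List (List (String × String)))) (file_info : List (String × String)) : PySem.Dict String (List (List (String × String))) :=
  let album := match PySem.Dict.get? ⟨file_info⟩ "album" with
    | some s => if s = "" then "Unknown Album" else s
    | none => "Unknown Album"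
  let artist := match PySem.Dict.get? ⟨file_info⟩ "artist" with
    | some s => if s = "" then "Unknown Artist" else s
    | none => "Unknown Artist"
  let key := artist ++ " - " ++ album
  let groups := if groups.contains key then groups else groups.insert key []
  groups.modify key [] (fun l => l ++ [file_info])

def group_by_album (files : List (List (String × String))) : List (String × List (List (String × String))) :=
  (files.foldl pvStepA PySem.Dict.empty).items

-- ===== PORT B =====
-- B's helper key_of
def pvKey (file_info : List (String × String)) : String :=
  let album := match PySem.Dict.get? ⟨file_info⟩ "album" with
    | some s => if s = "" then "Unknown Album" else s
    | none => "Unknown Album"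
  let artist := match PySem.Dict.get? ⟨file_info⟩ "artist" with
    | some s => if s = "" then "Unknown Artist" else s
    | none => "Unknown Artist"
  artist ++ " - " ++ album

def group_by_album_alt (files : List (List (String × String))) : List (String × List (List (String × String))) :=
  let keys := files.foldl (fun ks file_info =>
    let k := pvKey file_info
    if ks.contains k then ks else ks ++ [k]) ([] : List String)
  keys.map (fun k => (k, files.filter (fun f => pvKey f == k)))

-- ===== PRECONDITION & SPEC =====
def Spec_group_by_album (files : List (List (String × String))) (out : List (String × List (List (String × String)))) : Prop := out = group_by_album_alt files
instance (files : List (List (String × String))) (out : List (String × List (List (String × String)))) : Decidable (Spec_group_by_album files out) := by unfold Spec_group_by_album; infer_instance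

-- ===== CLAIM (what is proved, stated in full; the proofs are below) =====
def Claim_equal_group_by_album : Prop := ∀ (files : List (List (String × String))), Dom_group_by_album files → Spec_group_by_album files (group_by_album files)

-- ===== LEMMAS AND PROOFS =====

-- two dicts with the same items are equal
theorem pv_dict_ext {κ ν : Type} (x y : PySem.Dict κ ν) (h : x.items = y.items) : x = y := by
  cases x; cases y; cases h; rfl

-- inserting the key before overwriting it is the same as overwriting directly
theorem pv_insert_insert_self {ν : Type} (d : PySem.Dict String ν) (k : String) (v w : ν) :
    (d.insert k v).insert k w = d.insert k w := by
  apply pv_dict_ext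
  have hc2 : (d.insert k v).contains k = true := PySem.Dict.contains_insert_self d k v
  rw [PySem.Dict.items_insert_of_contains _ w hc2]
  by_cases hc : d.contains k
  · rw [PySem.Dict.items_insert_of_contains _ v hc, PySem.Dict.items_insert_of_contains _ w hc,
      List.map_map]
    apply List.map_congr_left
    intro p _
    by_cases hpk : p.1 = k <;> simp [hpk]
  · have hcf : d.contains k = false := eq_false_of_ne_true hc
    rw [PySem.Dict.items_insert_of_not_contains _ v hcf,
      PySem.Dict.items_insert_of_not_contains _ w hcf, List.map_append]
    have hnone : ∀ p ∈ d.items, (p.1 == k) = false := by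
      intro p hp
      by_contra hne
      have : d.contains k = true := List.any_eq_true.mpr ⟨p, hp, by simpa using hne⟩
      exact hc this
    congr 1
    · apply (List.map_congr_left _).trans (List.map_id _)
      intro p hp
      simp [hnone p hp]
    · simp

-- A's loop body is a single modify at the key
theorem pvStepA_eq (d : PySem.Dict String (List (List (String × String)))) (fi : List (String × String)) :
    pvStepA d fi = d.modify (pvKey fi) [] (fun l => l ++ [fi]) := by
  show (if d.contains (pvKey fi) then d else d.insert (pvKey fi) []).modify (pvKey fi) [] (fun l => l ++ [fi]) = _
  by_cases hc : d.contains (pvKey fi)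
  · rw [if_pos hc]
  · rw [if_neg hc]
    simp only [PySem.Dict.modify, PySem.Dict.getD_insert_self,
      PySem.Dict.getD_of_not_contains d [] (Bool.not_eq_true _ ▸ hc)]
    exact pv_insert_insert_self d (pvKey fi) [] ([] ++ [fi])

-- items of a dict with nodup keys, reconstructed key by key
theorem pv_items_eq_keys_map {ν : Type} (d : PySem.Dict String ν) (h : d.keys.Nodup) (d0 : ν) :
    d.items = d.keys.map (fun k => (k, d.getD k d0)) := by
  conv_lhs => rw [← List.map_id d.items]
  show _ = (d.items.map Prod.fst).map _
  rw [List.map_map]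
  apply List.map_congr_left
  intro p hp
  obtain ⟨a, b⟩ := p
  have hg := PySem.Dict.getD_of_mem_items d hp h d0
  simp [Function.comp, hg]

theorem pv_main (files : List (List (String × String))) :
    group_by_album files = group_by_album_alt files := by
  unfold group_by_album group_by_album_alt
  have hA : files.foldl pvStepA PySem.Dict.empty
      = (files.map (fun fi => ((pvKey fi, fi) : String × List (String × String)))).foldl
          (fun d p => d.modify p.1 [] (fun l => l ++ [p.2])) PySem.Dict.empty := by
    rw [List.foldl_map]
    congr 1
    funext d fi
    exact pvStepA_eq d fi
  have hkeys : (files.foldl pvStepA PySem.Dict.empty).keys = PySem.Set.ofList (files.map pvKey) := by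
    rw [hA, List.foldl_map]
    have := PySem.Dict.keys_foldl_modify_key files pvKey ([] : List (List (String × String)))
      (fun _ fi => (fun l => l ++ [fi])) PySem.Dict.empty
    rw [this, PySem.Dict.keys_empty, PySem.Set.ofList_eq_foldl]
    rfl
  have hgetD : ∀ c, (files.foldl pvStepA PySem.Dict.empty).getD c []
      = files.filter (fun f => pvKey f == c) := by
    intro c
    rw [hA, PySem.Dict.getD_foldl_modify_append, PySem.Dict.getD_empty, List.nil_append,
      List.filter_map, List.map_map]
    apply (List.map_congr_left _).trans (List.map_id _)
    intro f _
    rfl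
  have hnd : (files.foldl pvStepA PySem.Dict.empty).keys.Nodup := by
    rw [hkeys]; exact PySem.Set.nodup_ofList _
  rw [pv_items_eq_keys_map _ hnd [], hkeys]
  have hB : files.foldl (fun ks fi =>
        let k := pvKey fi
        if ks.contains k then ks else ks ++ [k]) ([] : List String)
      = PySem.Set.ofList (files.map pvKey) := by
    rw [PySem.Set.ofList_eq_foldl, List.foldl_map]
    rfl
  show _ = (files.foldl (fun ks fi =>
        let k := pvKey fi
        if ks.contains k then ks else ks ++ [k]) ([] : List String)).map
      (fun k => (k, files.filter (fun f => pvKey f == k)))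
  rw [hB]
  apply List.map_congr_left
  intro k _
  rw [hgetD k]

-- ===== VERDICT (by name: the statement is the Claim_ definition above) =====
theorem group_by_album_spec : Claim_equal_group_by_album := by
  intro files _
  unfold Spec_group_by_album
  exact pv_main files
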